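-- pv_equiv track=rewrite | github.com/allenbenj/Legal-AI-ssistant | legal_ai_system/utils/citation_analysis.py | _analyze_citation_network
-- ===== SOURCE A (Python) =====
-- from typing import Dict, List, Any, Optional, Tuple
--
-- def _analyze_citation_network(citations: List[Dict[str, Any]]) -> Dict[str, Any]:
--     """Analyze relationships and networks among citations."""
--     primary_authorities = []
--     supporting_authorities = []
--     counter_authorities = []
--
--     for citation in citations:
--         significance = citation.get('legal_significance', 'medium')
--         role = citation.get('argumentative_role', 'neutral')
--         citation_text = citation.get('normalized_citation', citation.get('raw_text', ''))
--
--         if significance == 'high' and role == 'supporting':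
--             primary_authorities.append(citation_text)
--         elif role == 'supporting':
--             supporting_authorities.append(citation_text)
--         elif role == 'rebutting':
--             counter_authorities.append(citation_text)
--
--     return {
--         'primary_authorities': primary_authorities[:10],  # Limit to top 10
--         'supporting_authorities': supporting_authorities[:15],
--         'counter_authorities': counter_authorities[:10],
--         'citation_clusters': []  # Could be enhanced with topic modeling
--     }
-- ===== SOURCE B (Python) =====
-- def _analyze_citation_network(citations):
--     """Analyze relationships and networks among citations."""
--     def sig(c):
--         return c.get('legal_significance', 'medium')
--     def role(c):
--         return c.get('argumentative_role', 'neutral')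
--     def text(c):
--         return c.get('normalized_citation', c.get('raw_text', ''))
--     return {
--         'primary_authorities': [text(c) for c in citations
--                                 if sig(c) == 'high' and role(c) == 'supporting'][:10],
--         'supporting_authorities': [text(c) for c in citations
--                                    if role(c) == 'supporting' and sig(c) != 'high'][:15],
--         'counter_authorities': [text(c) for c in citations
--                                 if role(c) == 'rebutting'][:10],
--         'citation_clusters': [],
--     }
-- ===== Notes on version B (the rewrite author's own statement) =====
-- stated objective: alternative
-- what changed: Replaces the single stateful loop appending into three accumulators with three independent filtering comprehensions, one per output category, each with its own membership condition.
import Mathlib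
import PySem

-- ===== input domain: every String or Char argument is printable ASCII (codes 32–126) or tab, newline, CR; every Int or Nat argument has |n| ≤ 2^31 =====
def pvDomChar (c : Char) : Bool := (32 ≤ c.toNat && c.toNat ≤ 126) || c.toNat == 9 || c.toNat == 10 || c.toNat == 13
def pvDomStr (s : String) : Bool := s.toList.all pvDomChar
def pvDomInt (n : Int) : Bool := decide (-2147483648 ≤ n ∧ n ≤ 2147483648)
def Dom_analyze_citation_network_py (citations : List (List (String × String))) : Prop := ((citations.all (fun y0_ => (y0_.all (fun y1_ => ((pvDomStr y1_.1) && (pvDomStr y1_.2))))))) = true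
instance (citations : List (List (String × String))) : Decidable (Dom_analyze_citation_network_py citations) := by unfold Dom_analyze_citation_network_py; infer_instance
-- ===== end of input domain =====

-- B replaces A's single three-accumulator loop by three independent filtering passes, one per category (objective: alternative decomposition).


-- ===== PORT A =====
-- single pass; dict.get via PySem.Dict.getD; xs[:k] with literal k ≥ 0 is List.take k (exact)
def pvStepA (st : List String × List String × List String) (citation : List (String × String)) :
    List String × List String × List String :=
  let d := PySem.Dict.mk citation
  let significance := d.getD "legal_significance" "medium"
  let role := d.getD "argumentative_role" "neutral"
  let citation_text := d.getD "normalized_citation" (d.getD "raw_text" "")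
  if significance == "high" && role == "supporting" then
    (st.1 ++ [citation_text], st.2.1, st.2.2)
  else if role == "supporting" then
    (st.1, st.2.1 ++ [citation_text], st.2.2)
  else if role == "rebutting" then
    (st.1, st.2.1, st.2.2 ++ [citation_text])
  else st

def analyze_citation_network_py (citations : List (List (String × String))) : List (String × List String) :=
  let st := citations.foldl pvStepA ([], [], [])
  [("primary_authorities", st.1.take 10),
   ("supporting_authorities", st.2.1.take 15),
   ("counter_authorities", st.2.2.take 10),
   ("citation_clusters", [])]

-- ===== PORT B =====
def pvSig (c : List (String × String)) : String := (PySem.Dict.mk c).getD "legal_significance" "medium"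
def pvRole (c : List (String × String)) : String := (PySem.Dict.mk c).getD "argumentative_role" "neutral"
def pvText (c : List (String × String)) : String :=
  (PySem.Dict.mk c).getD "normalized_citation" ((PySem.Dict.mk c).getD "raw_text" "")

def analyze_citation_network_py_alt (citations : List (List (String × String))) : List (String × List String) :=
  [("primary_authorities",
      (((citations.filter (fun c => pvSig c == "high" && pvRole c == "supporting")).map pvText).take 10)),
   ("supporting_authorities",
      (((citations.filter (fun c => pvRole c == "supporting" && pvSig c != "high")).map pvText).take 15)),
   ("counter_authorities",
      (((citations.filter (fun c => pvRole c == "rebutting")).map pvText).take 10)),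
   ("citation_clusters", [])]

-- ===== PRECONDITION & SPEC =====
def Spec_analyze_citation_network_py (citations : List (List (String × String))) (out : List (String × List String)) : Prop := out = analyze_citation_network_py_alt citations
instance (citations : List (List (String × String))) (out : List (String × List String)) : Decidable (Spec_analyze_citation_network_py citations out) := by unfold Spec_analyze_citation_network_py; infer_instance

-- ===== CLAIM (what is proved, stated in full; the proofs are below) =====
def Claim_equal_analyze_citation_network_py : Prop := ∀ (citations : List (List (String × String))), Dom_analyze_citation_network_py citations → Spec_analyze_citation_network_py citations (analyze_citation_network_py citations)

-- ===== LEMMAS AND PROOFS =====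
theorem stepA_eq (st : List String × List String × List String) (c : List (String × String)) :
    pvStepA st c =
      (if pvSig c == "high" && pvRole c == "supporting" then (st.1 ++ [pvText c], st.2.1, st.2.2)
       else if pvRole c == "supporting" then (st.1, st.2.1 ++ [pvText c], st.2.2)
       else if pvRole c == "rebutting" then (st.1, st.2.1, st.2.2 ++ [pvText c])
       else st) := rfl

theorem loop_eq (citations : List (List (String × String))) (a b c : List String) :
    citations.foldl pvStepA (a, b, c)
    = (a ++ (citations.filter (fun x => pvSig x == "high" && pvRole x == "supporting")).map pvText,
       b ++ (citations.filter (fun x => pvRole x == "supporting" && pvSig x != "high")).map pvText,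
       c ++ (citations.filter (fun x => pvRole x == "rebutting")).map pvText) := by
  induction citations generalizing a b c with
  | nil => simp
  | cons x xs ih =>
    rw [List.foldl_cons, stepA_eq]
    by_cases h1 : (pvSig x == "high" && pvRole x == "supporting") = true
    · have hs : (pvSig x == "high") = true := (Bool.and_eq_true _ _ ▸ h1).1
      have hr : (pvRole x == "supporting") = true := (Bool.and_eq_true _ _ ▸ h1).2
      have hrb : (pvRole x == "rebutting") = false := by
        simp only [beq_iff_eq] at hr ⊢; simp [hr]
      have hs' : pvSig x = "high" := by simpa using hs
      simp only [h1, if_true]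
      rw [ih]
      simp [List.filter_cons, h1, hs, hs', hr, hrb]
    · by_cases h2 : (pvRole x == "supporting") = true
      · have hs : (pvSig x == "high") = false := by
          cases hx : (pvSig x == "high") with
          | false => rfl
          | true => exact absurd (by rw [hx, h2]; rfl) h1
        have hrb : (pvRole x == "rebutting") = false := by
          simp only [beq_iff_eq] at h2 ⊢; simp [h2]
        have hs' : ¬ pvSig x = "high" := by simpa using hs
        simp only [h1, h2, if_true, if_false, Bool.false_eq_true]
        rw [ih]
        simp [List.filter_cons, h1, h2, hs, hs', hrb]
      · by_cases h3 : (pvRole x == "rebutting") = true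
        · simp only [h1, h2, h3, if_true, if_false, Bool.false_eq_true]
          rw [ih]
          simp [List.filter_cons, h1, h2, h3]
        · simp only [h1, h2, h3, if_false, Bool.false_eq_true]
          rw [ih]
          simp [List.filter_cons, h1, h2, h3,
            Bool.eq_false_iff.mpr h1, Bool.eq_false_iff.mpr h2, Bool.eq_false_iff.mpr h3]

-- ===== VERDICT (by name: the statement is the Claim_ definition above) =====
theorem analyze_citation_network_py_spec : Claim_equal_analyze_citation_network_py := by
  intro citations _
  unfold Spec_analyze_citation_network_py analyze_citation_network_py analyze_citation_network_py_alt
  rw [loop_eq]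
  simp
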